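-- pv_equiv track=rewrite | github.com/Solbjor/CodePathQuestions | session_one.py | count_endangered_species
-- ===== SOURCE A (Python) =====
-- def count_endangered_species(endangered_species, observed_species):
--     endangered_species = set(endangered_species)
--     count = 0
--     speciesDict = {}
--     for species in observed_species:
--         if species in endangered_species:
--             count += 1
--             if species in speciesDict:
--                 speciesDict[species] += 1
--             else:
--                 speciesDict[species] = 1
--         else:
--             continue
--     return speciesDict
-- ===== SOURCE B (Python) =====
-- def count_endangered_species(endangered_species, observed_species):
--     endangered = set(endangered_species)
--     # stage 1: the list of endangered sightings, in order
--     sightings = [s for s in observed_species if s in endangered]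
--     # stage 2: distinct sighted species in first-sighting order, each counted by a fresh scan
--     return {s: sightings.count(s) for s in dict.fromkeys(sightings)}
-- ===== Notes on version B (the rewrite author's own statement) =====
-- stated objective: alternative
-- what changed: A maintains a running per-species counter dict in one membership-gated pass; B keeps no running counts at all: it first materialises the list of endangered sightings, deduplicates it with dict.fromkeys, and computes each species' count by a separate full list.count scan.
import Mathlib
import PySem

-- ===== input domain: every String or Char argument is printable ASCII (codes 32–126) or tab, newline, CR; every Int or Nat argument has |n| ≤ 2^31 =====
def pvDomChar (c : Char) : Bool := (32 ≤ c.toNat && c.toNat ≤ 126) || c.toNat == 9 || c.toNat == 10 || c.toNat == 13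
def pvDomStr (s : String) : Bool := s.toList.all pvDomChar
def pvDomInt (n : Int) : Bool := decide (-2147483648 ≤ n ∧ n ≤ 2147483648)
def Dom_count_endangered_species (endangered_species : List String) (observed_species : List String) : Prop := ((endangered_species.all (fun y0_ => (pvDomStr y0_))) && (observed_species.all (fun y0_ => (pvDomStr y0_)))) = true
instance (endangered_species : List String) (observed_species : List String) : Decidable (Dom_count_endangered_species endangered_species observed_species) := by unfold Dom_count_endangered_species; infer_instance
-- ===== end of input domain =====

-- B replaces A's running-counter single pass by filter → dedup (dict.fromkeys) → per-key list.count scans (alternative decomposition, no incremental counting).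


-- ===== PORT A =====
def count_endangered_species (endangered_species : List String) (observed_species : List String) : List (String × Int) :=
  let es : PySem.Set String := PySem.Set.ofList endangered_species
  let st := observed_species.foldl (fun (st : Int × PySem.Dict String Int) species =>
      if PySem.Set.contains es species then
        if st.2.contains species then (st.1 + 1, st.2.insert species (st.2.getD species 0 + 1))
        else (st.1 + 1, st.2.insert species 1)
      else st) (0, PySem.Dict.empty)
  st.2.items

-- ===== PORT B =====
def count_endangered_species_alt (endangered_species : List String) (observed_species : List String) : List (String × Int) :=
  let endangered : PySem.Set String := PySem.Set.ofList endangered_species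
  -- stage 1: the list of endangered sightings, in order
  let sightings := observed_species.filter (fun s => PySem.Set.contains endangered s)
  -- stage 2: dict.fromkeys dedup, then a dict comprehension counting each key by list.count
  let keys : PySem.Set String := PySem.Set.ofList sightings
  ((keys.map (fun s => (s, (sightings.count s : Int)))).foldl
      (fun (d : PySem.Dict String Int) p => d.insert p.1 p.2) PySem.Dict.empty).items

-- ===== PRECONDITION & SPEC =====
def Spec_count_endangered_species (endangered_species : List String) (observed_species : List String) (out : List (String × Int)) : Prop := out = count_endangered_species_alt endangered_species observed_species
instance (endangered_species : List String) (observed_species : List String) (out : List (String × Int)) : Decidable (Spec_count_endangered_species endangered_species observed_species out) := by unfold Spec_count_endangered_species; infer_instance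

-- ===== CLAIM (what is proved, stated in full; the proofs are below) =====
def Claim_equal_count_endangered_species : Prop := ∀ (endangered_species : List String) (observed_species : List String), Dom_count_endangered_species endangered_species observed_species → Spec_count_endangered_species endangered_species observed_species (count_endangered_species endangered_species observed_species)

-- ===== LEMMAS AND PROOFS =====

-- A's pair state: the dict component ignores the counter component
theorem pv_snd_foldl (p : String → Bool) (o : List String) (c : Int) (d : PySem.Dict String Int) :
    (o.foldl (fun (st : Int × PySem.Dict String Int) s =>
        if p s then
          if st.2.contains s then (st.1 + 1, st.2.insert s (st.2.getD s 0 + 1))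
          else (st.1 + 1, st.2.insert s 1)
        else st) (c, d)).2
    = o.foldl (fun (d : PySem.Dict String Int) s =>
        if p s then
          if d.contains s then d.insert s (d.getD s 0 + 1) else d.insert s 1
        else d) d := by
  induction o generalizing c d with
  | nil => rfl
  | cons x xs ih =>
    simp only [List.foldl_cons]
    by_cases hp : p x = true
    · simp only [hp, if_true]
      by_cases hc : d.contains x = true
      · simp [hc, ih]
      · simp [hc, ih]
    · simp [hp, ih]

-- the contains-branch is just the counter increment
theorem pv_step_eq (d : PySem.Dict String Int) (s : String) :
    (if d.contains s then d.insert s (d.getD s 0 + 1) else d.insert s 1)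
    = d.insert s (d.getD s 0 + 1) := by
  by_cases hc : d.contains s = true
  · simp [hc]
  · rw [if_neg hc, PySem.Dict.getD_of_not_contains d (0 : Int) (by simp [hc])]; norm_num

-- ===== VERDICT (by name: the statement is the Claim_ definition above) =====
theorem count_endangered_species_spec : Claim_equal_count_endangered_species := by
  intro e o _
  unfold Spec_count_endangered_species count_endangered_species count_endangered_species_alt
  simp only []
  set p : String → Bool := fun s => PySem.Set.contains (PySem.Set.ofList e) s with hp
  set sightings := o.filter p with hs
  -- A side: drop the unused counter, fuse the gate into a filter, recognise Counter(sightings)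
  rw [show (PySem.Set.contains (PySem.Set.ofList e) : String → Bool) = p from rfl]
  rw [pv_snd_foldl p o 0 PySem.Dict.empty]
  have hA : (o.foldl (fun (d : PySem.Dict String Int) s =>
      if p s then (if d.contains s then d.insert s (d.getD s 0 + 1) else d.insert s 1) else d)
      PySem.Dict.empty)
      = sightings.foldl (fun (d : PySem.Dict String Int) s => d.insert s (d.getD s 0 + 1)) PySem.Dict.empty := by
    rw [hs, List.foldl_filter]
    apply PySem.List.foldl_congr_mem
    intro acc x _
    rw [pv_step_eq]
  rw [hA, PySem.Dict.foldl_insert_getD_add_one_eq_counter, PySem.Dict.items_counter]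
  -- B side: the comprehension inserts nodup fresh keys, so its items are exactly the mapped list
  have hfresh := PySem.Dict.items_foldl_insert_fresh
      ((PySem.Set.ofList sightings).map (fun s => (s, (sightings.count s : Int))))
      Prod.fst Prod.snd PySem.Dict.empty
      (by intro a _; simp)
      (by
        rw [List.map_map]
        have : (Prod.fst ∘ fun s => (s, (sightings.count s : Int))) = id := rfl
        rw [this, List.map_id]
        exact PySem.Set.nodup_ofList sightings)
  simp only [show (PySem.Dict.empty : PySem.Dict String Int).items = [] from rfl, List.nil_append] at hfresh
  rw [show (fun (d : PySem.Dict String Int) (q : String × Int) => d.insert q.1 q.2)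
        = (fun (d : PySem.Dict String Int) (a : String × Int) => d.insert a.1 a.2) from rfl]
  rw [hfresh, List.map_map]
  rfl
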